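-- pv_equiv track=rewrite | github.com/nounemsky/eef | utils/password_checker.py | _get_offline_status
-- ===== SOURCE A (Python) =====
-- def _get_offline_status(password: str) -> dict:
--     """Проверяет пароль локально без обращения к API"""
--     if not password:
--         return {'severity': 'empty'}
--
--     # Проверка сложности
--     has_upper = any(c.isupper() for c in password)
--     has_lower = any(c.islower() for c in password)
--     has_digit = any(c.isdigit() for c in password)
--     has_special = any(not c.isalnum() for c in password)
--     strength_score = sum([has_upper, has_lower, has_digit, has_special])
--
--     if len(password) < 8:
--         return {
--             'status': 'Too Short',
--             'message': 'Password is too short',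
--             'severity': 'danger'
--         }
--     elif strength_score < 3:
--         return {
--             'status': 'Weak',
--             'message': 'Password is too weak',
--             'severity': 'danger'
--         }
--     elif strength_score >= 3 and len(password) >= 12:
--         return {
--             'status': 'Potentially Safe',
--             'message': 'Strong password (offline check)',
--             'severity': 'safe'
--         }
--     else:
--         return {
--             'status': 'Moderate',
--             'message': 'Password strength is moderate',
--             'severity': 'warning'
--         }
-- ===== SOURCE B (Python) =====
-- def _char_class(c):
--     """Category of a character: 'U'ppercase, 'L'owercase, 'D'igit, 'S'pecial, or None."""
--     if c.isupper():
--         return 'U'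
--     if c.islower():
--         return 'L'
--     if c.isdigit():
--         return 'D'
--     if not c.isalnum():
--         return 'S'
--     return None
--
--
-- def _get_offline_status(password: str) -> dict:
--     """Classify-and-collect re-implementation: each character is mapped to its
--     category and the strength score is the number of distinct categories seen,
--     instead of four separate any(...) scans producing booleans."""
--     if not password:
--         return {'severity': 'empty'}
--
--     classes = set()
--     for c in password:
--         k = _char_class(c)
--         if k is not None:
--             classes.add(k)
--     score = len(classes)
--     n = len(password)
--
--     if n < 8:
--         return {'status': 'Too Short', 'message': 'Password is too short', 'severity': 'danger'}
--     if score < 3: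
--         return {'status': 'Weak', 'message': 'Password is too weak', 'severity': 'danger'}
--     if n >= 12:
--         return {'status': 'Potentially Safe', 'message': 'Strong password (offline check)', 'severity': 'safe'}
--     return {'status': 'Moderate', 'message': 'Password strength is moderate', 'severity': 'warning'}
-- ===== Notes on version B (the rewrite author's own statement) =====
-- stated objective: alternative
-- what changed: Instead of four separate any(...) scans producing four booleans that are summed, B maps each character to its category (upper/lower/digit/special) in one traversal, collects the categories in a set, and takes the strength score as the number of distinct categories; the branch cascade is flattened to early returns.
import Mathlib
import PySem

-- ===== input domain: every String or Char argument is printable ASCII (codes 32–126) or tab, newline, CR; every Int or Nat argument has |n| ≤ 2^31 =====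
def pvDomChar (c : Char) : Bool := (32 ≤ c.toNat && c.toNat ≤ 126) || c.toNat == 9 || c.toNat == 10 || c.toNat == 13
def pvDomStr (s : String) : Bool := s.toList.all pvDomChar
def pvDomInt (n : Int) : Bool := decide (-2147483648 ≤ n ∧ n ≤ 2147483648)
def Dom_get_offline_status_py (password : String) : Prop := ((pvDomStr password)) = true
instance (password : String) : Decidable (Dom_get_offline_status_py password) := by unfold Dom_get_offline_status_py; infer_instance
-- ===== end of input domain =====

-- B replaces the four boolean any(...) scans with a classify-and-collect pass: each
-- character maps to its category and the score is the size of the set of categories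
-- seen; objective: alternative decomposition, same value.

-- ===== PORT A =====
def get_offline_status_py (password : String) : List (String × String) :=
  if password.toList = [] then [("severity", "empty")] else
  let has_upper := password.toList.any PySem.Chars.isupper
  let has_lower := password.toList.any PySem.Chars.islower
  let has_digit := password.toList.any PySem.Chars.isdigit
  let has_special := password.toList.any (fun c => ! PySem.Chars.isalnum c)
  let strength_score : Int :=
    (if has_upper then 1 else 0) + (if has_lower then 1 else 0) +
    (if has_digit then 1 else 0) + (if has_special then 1 else 0)
  if (password.toList.length : Int) < 8 then
    [("status", "Too Short"), ("message", "Password is too short"), ("severity", "danger")]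
  else if strength_score < 3 then
    [("status", "Weak"), ("message", "Password is too weak"), ("severity", "danger")]
  else if strength_score ≥ 3 ∧ (password.toList.length : Int) ≥ 12 then
    [("status", "Potentially Safe"), ("message", "Strong password (offline check)"), ("severity", "safe")]
  else
    [("status", "Moderate"), ("message", "Password strength is moderate"), ("severity", "warning")]

-- ===== PORT B =====
-- _char_class: the category of one character, or none
def pvCharClass (c : Char) : Option String :=
  if PySem.Chars.isupper c then some "U"
  else if PySem.Chars.islower c then some "L"
  else if PySem.Chars.isdigit c then some "D"
  else if ! PySem.Chars.isalnum c then some "S"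
  else none

def get_offline_status_py_alt (password : String) : List (String × String) :=
  if password.toList = [] then [("severity", "empty")] else
  -- for c in password: k = _char_class(c); if k is not None: classes.add(k)
  let classes : PySem.Set String :=
    password.toList.foldl (fun s c =>
      match pvCharClass c with
      | some k => PySem.Set.add s k
      | none => s) PySem.Set.empty
  let score : Int := (classes.length : Int)
  let n : Int := (password.toList.length : Int)
  if n < 8 then
    [("status", "Too Short"), ("message", "Password is too short"), ("severity", "danger")]
  else if score < 3 then
    [("status", "Weak"), ("message", "Password is too weak"), ("severity", "danger")]
  else if n ≥ 12 then
    [("status", "Potentially Safe"), ("message", "Strong password (offline check)"), ("severity", "safe")]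
  else
    [("status", "Moderate"), ("message", "Password strength is moderate"), ("severity", "warning")]

-- ===== PRECONDITION & SPEC =====
def Spec_get_offline_status_py (password : String) (out : List (String × String)) : Prop := out = get_offline_status_py_alt password
instance (password : String) (out : List (String × String)) : Decidable (Spec_get_offline_status_py password out) := by unfold Spec_get_offline_status_py; infer_instance

-- ===== CLAIM =====
def Claim_equal_get_offline_status_py : Prop := ∀ (password : String), Dom_get_offline_status_py password → Spec_get_offline_status_py password (get_offline_status_py password)

-- ===== LEMMAS AND PROOFS =====

-- the B loop is ofList of the classified characters
theorem pvFold_step (cs : List Char) (s : PySem.Set String) :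
    cs.foldl (fun s c =>
      match pvCharClass c with
      | some k => PySem.Set.add s k
      | none => s) s
    = (cs.filterMap pvCharClass).foldl PySem.Set.add s := by
  induction cs generalizing s with
  | nil => rfl
  | cons c cs ih =>
    simp only [List.foldl_cons, List.filterMap_cons]
    cases pvCharClass c <;> simp [ih]

theorem pvFold_eq_ofList (cs : List Char) :
    cs.foldl (fun s c =>
      match pvCharClass c with
      | some k => PySem.Set.add s k
      | none => s) PySem.Set.empty
    = PySem.Set.ofList (cs.filterMap pvCharClass) := by
  rw [PySem.Set.ofList_eq_foldl]
  exact pvFold_step cs PySem.Set.empty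

-- character-range facts (the PySem predicates are ASCII ranges)
theorem pv_lower_not_upper (c : Char) : PySem.Chars.islower c → ¬ PySem.Chars.isupper c := by
  have h1 : ('a' : Char).val.toNat = 97 := rfl
  have h3 : ('A' : Char).val.toNat = 65 := rfl
  have h4 : ('Z' : Char).val.toNat = 90 := rfl
  simp only [PySem.Chars.islower, PySem.Chars.isupper, Bool.and_eq_true, decide_eq_true_eq,
    Char.le_def, UInt32.le_iff_toNat_le, h1, h3, h4]
  omega

theorem pv_digit_not_alpha (c : Char) :
    PySem.Chars.isdigit c → ¬ PySem.Chars.isupper c ∧ ¬ PySem.Chars.islower c := by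
  have h0 : ('0' : Char).val.toNat = 48 := rfl
  have h9 : ('9' : Char).val.toNat = 57 := rfl
  have h1 : ('a' : Char).val.toNat = 97 := rfl
  have h3 : ('A' : Char).val.toNat = 65 := rfl
  simp only [PySem.Chars.isdigit, PySem.Chars.isupper, PySem.Chars.islower, Bool.and_eq_true,
    decide_eq_true_eq, Char.le_def, UInt32.le_iff_toNat_le, h0, h9, h1, h3]
  omega

-- membership in the classified list equals the corresponding any-flag
theorem pv_mem_U (cs : List Char) :
    ("U" ∈ cs.filterMap pvCharClass) ↔ cs.any PySem.Chars.isupper = true := by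
  simp only [List.mem_filterMap, List.any_eq_true]
  constructor
  · rintro ⟨c, hc, h⟩
    refine ⟨c, hc, ?_⟩
    unfold pvCharClass at h
    split_ifs at h <;> simp_all
  · rintro ⟨c, hc, h⟩
    exact ⟨c, hc, by unfold pvCharClass; simp [h]⟩

theorem pv_mem_L (cs : List Char) :
    ("L" ∈ cs.filterMap pvCharClass) ↔ cs.any PySem.Chars.islower = true := by
  simp only [List.mem_filterMap, List.any_eq_true]
  constructor
  · rintro ⟨c, hc, h⟩
    refine ⟨c, hc, ?_⟩
    unfold pvCharClass at h
    split_ifs at h <;> simp_all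
  · rintro ⟨c, hc, h⟩
    refine ⟨c, hc, ?_⟩
    have hu : ¬ PySem.Chars.isupper c := pv_lower_not_upper c h
    unfold pvCharClass
    simp [h, hu]

theorem pv_mem_D (cs : List Char) :
    ("D" ∈ cs.filterMap pvCharClass) ↔ cs.any PySem.Chars.isdigit = true := by
  simp only [List.mem_filterMap, List.any_eq_true]
  constructor
  · rintro ⟨c, hc, h⟩
    refine ⟨c, hc, ?_⟩
    unfold pvCharClass at h
    split_ifs at h <;> simp_all
  · rintro ⟨c, hc, h⟩
    refine ⟨c, hc, ?_⟩
    obtain ⟨hu, hl⟩ := pv_digit_not_alpha c h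
    unfold pvCharClass
    simp [h, hu, hl]

theorem pv_mem_S (cs : List Char) :
    ("S" ∈ cs.filterMap pvCharClass) ↔ cs.any (fun c => ! PySem.Chars.isalnum c) = true := by
  simp only [List.mem_filterMap, List.any_eq_true]
  constructor
  · rintro ⟨c, hc, h⟩
    refine ⟨c, hc, ?_⟩
    unfold pvCharClass at h
    split_ifs at h <;> simp_all
  · rintro ⟨c, hc, h⟩
    refine ⟨c, hc, ?_⟩
    have := h
    simp only [PySem.Chars.isalnum, PySem.Chars.isalpha, Bool.not_eq_true', Bool.or_eq_false_iff] at this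
    obtain ⟨⟨hu, hl⟩, hd⟩ := this
    unfold pvCharClass
    simp [hu, hl, hd, h]

-- every classified character is one of the four categories
theorem pv_class_mem (cs : List Char) :
    ∀ x ∈ cs.filterMap pvCharClass, x = "U" ∨ x = "L" ∨ x = "D" ∨ x = "S" := by
  intro x hx
  obtain ⟨c, _, h⟩ := List.mem_filterMap.mp hx
  unfold pvCharClass at h
  split_ifs at h <;> simp_all

-- size of the category set = sum of the four indicator bits
theorem pv_len4 (L : List String) (h : ∀ x ∈ L, x = "U" ∨ x = "L" ∨ x = "D" ∨ x = "S") :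
    (PySem.Set.ofList L).length =
      (if "U" ∈ L then 1 else 0) + (if "L" ∈ L then 1 else 0) +
      (if "D" ∈ L then 1 else 0) + (if "S" ∈ L then 1 else 0) := by
  have nd : (PySem.Set.ofList L).Nodup := PySem.Set.nodup_ofList L
  have ndF : (["U", "L", "D", "S"].filter (fun x => decide (x ∈ L))).Nodup :=
    List.Nodup.filter _ (by decide)
  have hp : List.Perm (PySem.Set.ofList L) (["U", "L", "D", "S"].filter (fun x => decide (x ∈ L))) := by
    rw [List.perm_ext_iff_of_nodup nd ndF]
    intro a
    simp only [PySem.Set.mem_ofList, List.mem_filter, decide_eq_true_eq]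
    constructor
    · intro ha
      refine ⟨?_, ha⟩
      rcases h a ha with h' | h' | h' | h' <;> simp [h']
    · exact fun ⟨_, ha⟩ => ha
  rw [hp.length_eq]
  by_cases hU : "U" ∈ L <;> by_cases hl : "L" ∈ L <;> by_cases hD : "D" ∈ L <;>
    by_cases hS : "S" ∈ L <;> simp [List.filter_nil, hU, hl, hD, hS]

-- ===== VERDICT =====
theorem get_offline_status_py_spec : Claim_equal_get_offline_status_py := by
  intro password _
  unfold Spec_get_offline_status_py get_offline_status_py get_offline_status_py_alt
  by_cases hnil : password.toList = []
  · simp [hnil]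
  · simp only [hnil, reduceIte, pvFold_eq_ofList]
    have hlen := pv_len4 (password.toList.filterMap pvCharClass)
      (pv_class_mem password.toList)
    simp only [pv_mem_U, pv_mem_L, pv_mem_D, pv_mem_S] at hlen
    split_ifs at hlen ⊢ <;> first | rfl | (exfalso; omega)
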